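-- pv_equiv track=rewrite | github.com/Vinay-webDev/1hackerrankjs | 62.py | decryptPassword
-- ===== SOURCE A (Python) =====
-- def decryptPassword(s):
--     s = list(s)
--     N = len(s)
--     i = 0
--     while i < N and s[i].isdigit() and s[i] != "0":
--         i += 1
--     digits = s[:i]
--     digits.reverse()
--     for zero_index in range(len(digits)):
--         zero_position = s.index("0", i)
--         s[zero_position] = digits[zero_index]
--     for j in range(i, len(s)):
--         if s[j] == "*":
--             s[j - 1], s[j - 2] = s[j - 2], s[j - 1]
--     decrypted_password = "".join(s[i:]).replace("*", "")
--     return decrypted_password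
-- ===== SOURCE B (Python) =====
-- def decryptPassword(s):
--     n = len(s)
--     i = 0
--     while i < n and "1" <= s[i] <= "9":
--         i += 1
--     # hand the prefix digits out back-to-front through an iterator: each '0' in the
--     # tail consumes the next one (no index searches at all)
--     it = iter(s[i - 1 :: -1] if i else "")
--     u = list(s[:i]) + [next(it, c) if c == "0" else c for c in s[i:]]
--     # streaming two-character window: a '*' swaps the two characters before it,
--     # everything left of the window is final and is emitted immediately
--     if len(u) < 2:
--         out = u
--     else:
--         out = []
--         x, y = u[0], u[1]
--         for c in u[2:]:
--             if c == "*":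
--                 out.append(y)
--                 x, y = x, "*"
--             else:
--                 out.append(x)
--                 x, y = y, c
--         out.append(x)
--         out.append(y)
--     return "".join(c for c in out[i:] if c != "*")
-- ===== Notes on version B (the rewrite author's own statement) =====
-- stated objective: alternative
-- what changed: A repeatedly rescans with s.index('0', i) after building a reversed copy of the prefix and then mutates the whole array in an index loop testing every j for '*'; B instead hands the prefix digits out through a single iterator that each '0' consumes, and replaces the in-place swap loop by a streaming two-character window fold that emits each character once it can no longer be touched, swapping the window on '*'.
-- intended difference: On strings of length >= 3 with '*' at index 0 or 1 and at least two distinct non-'*' characters, A's j-1/j-2 indices go negative and wrap, so A returns the tail with characters swapped against the END of the string (e.g. '*ab' -> 'ba'); B lets a '*' without two preceding characters swap nothing ('*ab' -> 'ab'), the intended local swap semantics. — e.g. on decryptPassword("*ab"): A returns "ba", B returns "ab"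
import Mathlib
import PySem

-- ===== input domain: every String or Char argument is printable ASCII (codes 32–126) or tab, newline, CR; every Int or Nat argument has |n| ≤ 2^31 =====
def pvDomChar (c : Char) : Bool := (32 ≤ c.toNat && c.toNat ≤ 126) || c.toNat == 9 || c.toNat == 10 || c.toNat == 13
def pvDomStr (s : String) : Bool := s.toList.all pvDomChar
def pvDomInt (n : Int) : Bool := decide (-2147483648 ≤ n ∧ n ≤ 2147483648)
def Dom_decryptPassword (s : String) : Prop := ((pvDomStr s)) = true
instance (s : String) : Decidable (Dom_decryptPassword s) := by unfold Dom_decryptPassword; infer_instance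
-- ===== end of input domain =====

-- B replaces A's repeated s.index('0', i) searches by ONE iterator pass handing the prefix digits
-- to the zeros, and A's in-place swap loop over the whole array by a streaming two-character
-- window that emits finalized characters; objective: alternative.  On strings of length ≥ 3 with
-- '*' at index 0 or 1 A's negative indices wrap to the END of the string (D_ below): B does the
-- intended thing there (a '*' without two predecessors swaps nothing).

-- ===== PORT A =====

-- while i < N and s[i].isdigit() and s[i] != "0": i += 1
def aPrefixLen : List Char → Nat
  | [] => 0
  | c :: t => if PySem.Chars.isdigit c && c != '0' then aPrefixLen t + 1 else 0

-- for zero_index in range(len(digits)): zero_position = s.index("0", i); s[zero_position] = digits[zero_index]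
-- s.index("0", i) is ported by hand (PySem.List.index? has no start argument): it is exactly
-- i + the index of '0' in s[i:]; none = ValueError (excluded by Pre_).
def aFill : List Char → List Char → Nat → Option (List Char)
  | s, [], _ => some s
  | s, d :: ds, i =>
    match (PySem.List.index? (s.drop i) '0').map (· + i) with
    | none => none
    | some p => aFill (s.set p d) ds i

-- body of `if s[j] == "*": s[j-1], s[j-2] = s[j-2], s[j-1]` (Python negative indices wrap;
-- the none branch is Python's IndexError, reached only by s = "*", which Pre_ excludes)
def aSwapStep (s : List Char) (j : Int) : List Char :=
  if PySem.List.pyGet? s j = some '*' then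
    match PySem.List.pyGet? s (j - 2), PySem.List.pyGet? s (j - 1) with
    | some a, some b => PySem.List.pySetD (PySem.List.pySetD s (j - 1) a) (j - 2) b
    | _, _ => s
  else s

def decryptPassword (s : String) : String :=
  let l := s.toList
  let N := l.length
  let i := aPrefixLen l
  let digits := (l.take i).reverse
  match aFill l digits i with
  | none => ""   -- Python raises ValueError here; excluded by Pre_
  | some s1 =>
    -- for j in range(i, len(s)): …
    String.ofList (PySem.Chars.replace
      (((PySem.List.pyRange (i : Int) (N : Int) 1).foldl aSwapStep s1).drop i) ['*'] [])

-- ===== PORT B =====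

-- while i < n and "1" <= s[i] <= "9": i += 1
def bPrefixLen : List Char → Nat
  | [] => 0
  | c :: t => if decide ('1' ≤ c) && decide (c ≤ '9') then bPrefixLen t + 1 else 0

-- [next(it, c) if c == "0" else c for c in s[i:]]  with it = iter(s[:i][::-1]):
-- the iterator state is the list of digits not yet handed out
def bFill : List Char → List Char → List Char
  | _, [] => []
  | ds, c :: t =>
    if c = '0' then
      match ds with
      | d :: ds' => d :: bFill ds' t
      | [] => c :: bFill [] t
    else c :: bFill ds t

-- loop body of B's scan: state (out, x, y); '*' emits y and keeps (x, '*'),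
-- anything else emits x and slides the window
def bStep (acc : List Char × Char × Char) (c : Char) : List Char × Char × Char :=
  if c = '*' then (acc.1 ++ [acc.2.2], acc.2.1, '*') else (acc.1 ++ [acc.2.1], acc.2.2, c)

def decryptPassword_alt (s : String) : String :=
  let l := s.toList
  let i := bPrefixLen l
  let u := l.take i ++ bFill (l.take i).reverse (l.drop i)
  let out :=
    match u with
    | c0 :: c1 :: rest =>
      let st := rest.foldl bStep ([], c0, c1)
      st.1 ++ [st.2.1, st.2.2]
    | _ => u
  String.ofList ((out.drop i).filter (· ≠ '*'))

-- ===== PRECONDITION & SPEC =====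

def pvPred (c : Char) : Bool := decide ('1' ≤ c) && decide (c ≤ '9')

-- Pre_ is exactly where the Python A returns: at least one '0' after the leading non-zero
-- digits for each of those digits (else s.index raises ValueError), and s ≠ "*" (the one
-- string on which s[j - 2] raises IndexError in the swap loop).
def Pre_decryptPassword (s : String) : Prop :=
  (s.toList.takeWhile pvPred).length ≤
    ((s.toList.drop (s.toList.takeWhile pvPred).length).count '0') ∧ s ≠ "*"
instance (s : String) : Decidable (Pre_decryptPassword s) := by unfold Pre_decryptPassword; infer_instance

def pvWitness_decryptPassword : String := "1a0"

-- On strings of length ≥ 3 with a '*' at index 0 or 1 (and at least two distinct non-'*'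
-- characters, so that moving characters is visible at all), A's j-1/j-2 indices are negative and
-- wrap, so A swaps characters with the END of the string; B lets a '*' without two characters
-- before it swap nothing, the intended local swap semantics.
def D_decryptPassword (s : String) : Prop :=
  3 ≤ s.toList.length ∧ '*' ∈ s.toList.take 2 ∧
    ∃ a ∈ s.toList.filter (· ≠ '*'), ∃ b ∈ s.toList.filter (· ≠ '*'), a ≠ b
instance (s : String) : Decidable (D_decryptPassword s) := by unfold D_decryptPassword; infer_instance

def Spec_decryptPassword (s : String) (out : String) : Prop :=
  ¬ D_decryptPassword s → out = decryptPassword_alt s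
instance (s : String) (out : String) : Decidable (Spec_decryptPassword s out) := by unfold Spec_decryptPassword; infer_instance

def pvDiffWitness_decryptPassword : String := "*ab"
def pvDiffWitnessOut_decryptPassword : String × String := ("ba", "ab")

-- ===== CLAIM (what is proved, stated in full; the proofs are below) =====
def Claim_unchanged_decryptPassword : Prop := ∀ (s : String), Dom_decryptPassword s → Pre_decryptPassword s → Spec_decryptPassword s (decryptPassword s)
def Claim_changed_decryptPassword : Prop := Dom_decryptPassword (pvDiffWitness_decryptPassword) ∧ Pre_decryptPassword (pvDiffWitness_decryptPassword) ∧ D_decryptPassword (pvDiffWitness_decryptPassword) ∧ decryptPassword (pvDiffWitness_decryptPassword) = pvDiffWitnessOut_decryptPassword.1 ∧ decryptPassword_alt (pvDiffWitness_decryptPassword) = pvDiffWitnessOut_decryptPassword.2 ∧ pvDiffWitnessOut_decryptPassword.1 ≠ pvDiffWitnessOut_decryptPassword.2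

-- ===== LEMMAS AND PROOFS =====

-- the common reference point: replace the first |D| zeros of t by the elements of D, in order
def zfill : List Char → List Char → List Char
  | t, [] => t
  | [], _ :: _ => []
  | c :: t, d :: ds => if c = '0' then d :: zfill t ds else c :: zfill t (d :: ds)

theorem zfill_nil_right (t : List Char) : zfill t [] = t := by cases t <;> rfl

theorem zfill_cons_zero (t : List Char) (d : Char) (ds : List Char) :
    zfill ('0' :: t) (d :: ds) = d :: zfill t ds := rfl

theorem zfill_cons_ne {c : Char} (t D : List Char) (hc : c ≠ '0') :
    zfill (c :: t) D = c :: zfill t D := by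
  cases D with
  | nil => simp [zfill_nil_right]
  | cons d ds => simp [zfill, hc]

theorem zfill_noZero (pre u D : List Char) (h : '0' ∉ pre) :
    zfill (pre ++ u) D = pre ++ zfill u D := by
  induction pre with
  | nil => simp
  | cons c pre' ih =>
    have hc : c ≠ '0' := by intro hc; exact h (by simp [hc])
    rw [List.cons_append, zfill_cons_ne _ _ hc, ih (by intro hm; exact h (by simp [hm]))]
    rfl

theorem length_zfill (t D : List Char) : (zfill t D).length = t.length := by
  induction t generalizing D with
  | nil => cases D <;> rfl
  | cons c t ih =>
    cases D with
    | nil => simp [zfill_nil_right]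
    | cons d ds =>
      by_cases h : c = '0'
      · subst h; rw [zfill_cons_zero]; simp [ih]
      · rw [zfill_cons_ne _ _ h]; simp [ih]

theorem pvCond_eq (c : Char) : (PySem.Chars.isdigit c && c != '0') = pvPred c := by
  have h0 : ('0':Char) ≤ c ↔ 48 ≤ c.toNat := by rw [Char.le_def]; exact ⟨fun h => h, fun h => h⟩
  have h1 : ('1':Char) ≤ c ↔ 49 ≤ c.toNat := by rw [Char.le_def]; exact ⟨fun h => h, fun h => h⟩
  have h9 : c ≤ ('9':Char) ↔ c.toNat ≤ 57 := by rw [Char.le_def]; exact ⟨fun h => h, fun h => h⟩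
  have hne : (c != '0') = decide (c.toNat ≠ 48) := by
    rcases eq_or_ne c '0' with h | h
    · subst h; decide
    · have hn : c.toNat ≠ 48 := fun hc => h (Char.ext (UInt32.toNat_inj.mp hc))
      simp [h, hn]
  simp only [PySem.Chars.isdigit, pvPred, hne, ← Bool.decide_and, decide_eq_decide, h0, h1, h9]
  omega

theorem aPrefixLen_eq (l : List Char) : aPrefixLen l = (l.takeWhile pvPred).length := by
  induction l with
  | nil => rfl
  | cons c t ih =>
    simp only [aPrefixLen, List.takeWhile, pvCond_eq]
    cases h : pvPred c <;> simp [ih]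

theorem bPrefixLen_eq (l : List Char) : bPrefixLen l = (l.takeWhile pvPred).length := by
  induction l with
  | nil => rfl
  | cons c t ih =>
    show (if pvPred c then bPrefixLen t + 1 else 0) = _
    simp only [List.takeWhile]
    cases h : pvPred c <;> simp [ih]

theorem set_append_length (xs : List Char) (y : Char) (ys : List Char) (v : Char) :
    (xs ++ y :: ys).set xs.length v = xs ++ v :: ys := by
  induction xs with
  | nil => rfl
  | cons x xs ih => simp [ih]

theorem aFill_eq (D : List Char) (p t : List Char)
    (hD : ∀ d ∈ D, d ≠ '0') (hcnt : D.length ≤ t.count '0') :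
    aFill (p ++ t) D p.length = some (p ++ zfill t D) := by
  induction D generalizing t with
  | nil => simp [aFill, zfill_nil_right]
  | cons d ds ih =>
    have hmem : '0' ∈ t := by
      rw [← List.count_pos_iff]
      simp at hcnt; omega
    have hsome : (PySem.List.index? t '0').isSome := (PySem.List.index?_isSome_iff t '0').mpr hmem
    obtain ⟨k, hk⟩ := Option.isSome_iff_exists.mp hsome
    obtain ⟨pre, suf, ht, hlen, hpre⟩ := (PySem.List.index?_eq_some_iff t '0' k).mp hk
    have hdrop : (p ++ t).drop p.length = t := List.drop_left
    have hd0 : d ≠ '0' := hD d (by simp)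
    have hset : (p ++ t).set (k + p.length) d = p ++ (pre ++ d :: suf) := by
      subst ht
      rw [show p ++ (pre ++ '0' :: suf) = (p ++ pre) ++ '0' :: suf by simp,
        show k + p.length = (p ++ pre).length by simp [← hlen]; omega,
        set_append_length]
      simp
    have hcnt' : ds.length ≤ (pre ++ d :: suf).count '0' := by
      subst ht
      have h0pre : pre.count '0' = 0 := List.count_eq_zero.mpr hpre
      simp [List.count_append, h0pre, hd0] at hcnt ⊢
      omega
    have hzf : zfill t (d :: ds) = zfill (pre ++ d :: suf) ds := by
      subst ht
      rw [zfill_noZero pre _ _ hpre, zfill_noZero pre _ _ hpre, zfill_cons_zero,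
        zfill_cons_ne _ _ hd0]
    rw [aFill, hdrop, hk]
    simp only [Option.map_some]
    rw [hset, ih (pre ++ d :: suf) (fun x hx => hD x (by simp [hx])) hcnt', hzf]

-- B's iterator comprehension computes zfill (with leftover zeros kept once the iterator is empty)
theorem bFill_eq_zfill (t : List Char) : ∀ ds : List Char, bFill ds t = zfill t ds := by
  induction t with
  | nil => intro ds; cases ds <;> rfl
  | cons c t ih =>
    intro ds
    by_cases hc : c = '0'
    · subst hc
      cases ds with
      | nil => show '0' :: bFill [] t = '0' :: t; rw [ih, zfill_nil_right]
      | cons d ds' => show d :: bFill ds' t = _; rw [ih, zfill_cons_zero]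
    · cases ds with
      | nil => simp only [bFill, if_neg hc, zfill_nil_right, ih, zfill_nil_right]
      | cons d ds' => simp only [bFill, if_neg hc, ih, zfill_cons_ne _ _ hc]

-- filling never creates a star
theorem zfill_star (t : List Char) : ∀ (D : List Char), (∀ d ∈ D, d ≠ '*') →
    ∀ (k : Nat), (zfill t D)[k]? = some '*' → t[k]? = some '*' := by
  induction t with
  | nil => intro D _ k h; cases D <;> simp [zfill] at h
  | cons c t ih =>
    intro D hD k h
    cases D with
    | nil => rwa [zfill_nil_right] at h
    | cons d ds =>
      by_cases hc : c = '0'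
      · subst hc
        rw [zfill_cons_zero] at h
        cases k with
        | zero =>
          simp at h
          exact absurd h (hD d (by simp))
        | succ k =>
          simp only [List.getElem?_cons_succ] at h ⊢
          exact ih ds (fun x hx => hD x (by simp [hx])) k h
      · rw [zfill_cons_ne _ _ hc] at h
        cases k with
        | zero => simpa using h
        | succ k =>
          simp only [List.getElem?_cons_succ] at h ⊢
          exact ih (d :: ds) hD k h

theorem u_star (p t : List Char) (hp : ∀ d ∈ p, d ≠ '*') (k : Nat)
    (h : (p ++ zfill t p.reverse)[k]? = some '*') : (p ++ t)[k]? = some '*' := by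
  by_cases hk : k < p.length
  · rwa [List.getElem?_append_left hk] at h ⊢
  · rw [List.getElem?_append_right (by omega)] at h ⊢
    exact zfill_star t p.reverse (fun d hd => hp d (List.mem_reverse.mp hd)) _ h

-- range(a, b) as a cons
theorem pyRange_nat_cons (a b : Nat) (h : a < b) :
    PySem.List.pyRange (a : Int) (b : Int) 1 = (a : Int) :: PySem.List.pyRange ((a + 1 : Nat) : Int) (b : Int) 1 := by
  rw [PySem.List.pyRange_one_cons (by exact_mod_cast h)]
  norm_num

theorem pyRange_nat_nil (a b : Nat) (h : b ≤ a) :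
    PySem.List.pyRange (a : Int) (b : Int) 1 = [] :=
  PySem.List.pyRange_one_eq_nil (by exact_mod_cast h)

theorem aSwapStep_nonstar (s : List Char) (m : Nat) (h : ¬ PySem.List.pyGet? s (m : Int) = some '*') :
    aSwapStep s (m : Int) = s := by
  unfold aSwapStep
  rw [if_neg h]

-- a star-free stretch of the loop does nothing
theorem foldl_swap_id (s : List Char) (b : Nat) : ∀ a : Nat,
    (∀ m : Nat, a ≤ m → m < b → ¬ PySem.List.pyGet? s (m : Int) = some '*') →
    (PySem.List.pyRange (a : Int) (b : Int) 1).foldl aSwapStep s = s := by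
  intro a
  induction hf : b - a generalizing a with
  | zero => intro _; rw [pyRange_nat_nil a b (by omega)]; rfl
  | succ n ih =>
    intro h
    have ha : a < b := by omega
    rw [pyRange_nat_cons a b ha, List.foldl_cons, aSwapStep_nonstar s a (h a le_rfl ha)]
    exact ih (a + 1) (by omega) (fun m h1 h2 => h m (Nat.le_of_succ_le h1) h2)

-- skipping a star-free stretch
theorem foldl_swap_skip (s : List Char) (b : Nat) : ∀ (a q : Nat), a ≤ q → q ≤ b →
    (∀ m : Nat, a ≤ m → m < q → ¬ PySem.List.pyGet? s (m : Int) = some '*') →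
    (PySem.List.pyRange (a : Int) (b : Int) 1).foldl aSwapStep s
      = (PySem.List.pyRange (q : Int) (b : Int) 1).foldl aSwapStep s := by
  intro a q
  induction hf : q - a generalizing a with
  | zero => intro haq hqb h; rw [show a = q by omega]
  | succ n ih =>
    intro haq hqb h
    have ha : a < q := by omega
    rw [pyRange_nat_cons a b (by omega), List.foldl_cons, aSwapStep_nonstar s a (h a le_rfl ha)]
    exact ih (a + 1) (by omega) (by omega) (by omega) (fun m h1 h2 => h m (Nat.le_of_succ_le h1) h2)

-- B's accumulator only ever grows at the tail
theorem bStep_acc (rest : List Char) : ∀ (acc : List Char) (x y : Char),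
    rest.foldl bStep (acc, x, y)
      = (acc ++ (rest.foldl bStep (([] : List Char), x, y)).1, (rest.foldl bStep (([] : List Char), x, y)).2) := by
  induction rest with
  | nil => intro acc x y; simp
  | cons c r ih =>
    intro acc x y
    by_cases hc : c = '*'
    · subst hc
      rw [List.foldl_cons, List.foldl_cons, show bStep (acc, x, y) '*' = (acc ++ [y], x, '*') from rfl,
        show bStep (([] : List Char), x, y) '*' = ([y], x, '*') from rfl, ih (acc ++ [y]), ih [y]]
      simp
    · rw [List.foldl_cons, List.foldl_cons,
        show bStep (acc, x, y) c = (acc ++ [x], y, c) from by simp [bStep, hc],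
        show bStep (([] : List Char), x, y) c = ([x], y, c) from by simp [bStep, hc],
        ih (acc ++ [x]), ih [x]]
      simp

-- the heart of the equivalence: A's index loop from position done.length+2 computes exactly
-- B's streaming window fold
theorem scan_eq (rest : List Char) : ∀ (done : List Char) (x y : Char),
    (PySem.List.pyRange ((done.length + 2 : Nat) : Int) ((done.length + 2 + rest.length : Nat) : Int) 1).foldl
        aSwapStep (done ++ x :: y :: rest)
      = done ++ (rest.foldl bStep (([] : List Char), x, y)).1
          ++ [(rest.foldl bStep (([] : List Char), x, y)).2.1, (rest.foldl bStep (([] : List Char), x, y)).2.2] := by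
  induction rest with
  | nil =>
    intro done x y
    rw [show done.length + 2 + ([] : List Char).length = done.length + 2 by simp,
      pyRange_nat_nil _ _ le_rfl]
    simp
  | cons c r ih =>
    intro done x y
    have hget : PySem.List.pyGet? (done ++ x :: y :: c :: r) ((done.length + 2 : Nat) : Int) = some c := by
      rw [PySem.List.pyGet?_natCast, List.getElem?_append_right (by omega)]
      simp
    have hlt : done.length + 2 < done.length + 2 + (c :: r).length := by simp
    rw [pyRange_nat_cons _ _ hlt, List.foldl_cons]
    by_cases hc : c = '*'
    · subst hc
      have hj2 : ((done.length + 2 : Nat) : Int) - 2 = ((done.length : Nat) : Int) := by push_cast; ring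
      have hj1 : ((done.length + 2 : Nat) : Int) - 1 = ((done.length + 1 : Nat) : Int) := by push_cast; ring
      have hga : PySem.List.pyGet? (done ++ x :: y :: '*' :: r) ((done.length : Nat) : Int) = some x :=
        PySem.List.pyGet?_append_length done (y :: '*' :: r) x
      have hgb : PySem.List.pyGet? (done ++ x :: y :: '*' :: r) ((done.length + 1 : Nat) : Int) = some y := by
        rw [show done ++ x :: y :: '*' :: r = (done ++ [x]) ++ y :: '*' :: r by simp,
          show ((done.length + 1 : Nat) : Int) = (((done ++ [x]).length : Nat) : Int) by simp]
        exact PySem.List.pyGet?_append_length (done ++ [x]) ('*' :: r) y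
      have hstep : aSwapStep (done ++ x :: y :: '*' :: r) ((done.length + 2 : Nat) : Int)
          = (done ++ [y]) ++ x :: '*' :: r := by
        unfold aSwapStep
        rw [if_pos hget, hj2, hj1, hga, hgb]
        simp only [PySem.List.pySetD_natCast]
        rw [show done ++ x :: y :: '*' :: r = (done ++ [x]) ++ y :: '*' :: r by simp,
          show (done.length + 1 : Nat) = (done ++ [x]).length by simp,
          set_append_length,
          show (done ++ [x]) ++ x :: '*' :: r = done ++ x :: x :: '*' :: r by simp,
          set_append_length]
        simp
      rw [hstep]
      have e2 : done.length + 2 + ('*' :: r).length = (done ++ [y]).length + 2 + r.length := by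
        simp only [List.length_append, List.length_cons, List.length_nil]; omega
      have e1 : done.length + 2 + 1 = (done ++ [y]).length + 2 := by
        simp only [List.length_append, List.length_cons, List.length_nil]
      rw [e2, e1, ih (done ++ [y]) x '*', List.foldl_cons,
        show bStep (([] : List Char), x, y) '*' = ([y], x, '*') from rfl,
        bStep_acc r [y] x '*']
      simp
    · have hstep : aSwapStep (done ++ x :: y :: c :: r) ((done.length + 2 : Nat) : Int)
          = (done ++ [x]) ++ y :: c :: r := by
        rw [aSwapStep, if_neg (by rw [hget]; simp [hc])]
        simp
      rw [hstep]
      have e2 : done.length + 2 + (c :: r).length = (done ++ [x]).length + 2 + r.length := by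
        simp only [List.length_append, List.length_cons, List.length_nil]; omega
      have e1 : done.length + 2 + 1 = (done ++ [x]).length + 2 := by
        simp only [List.length_append, List.length_cons, List.length_nil]
      rw [e2, e1, ih (done ++ [x]) y c, List.foldl_cons,
        show bStep (([] : List Char), x, y) c = ([x], y, c) from by simp [bStep, hc],
        bStep_acc r [x] y c]
      simp

-- str.replace("*", "") removes the stars
theorem replace_go_star (fuel : Nat) : ∀ (l acc : List Char), l.length ≤ fuel →
    PySem.Chars.replace.go ['*'] [] fuel l acc = acc.reverse ++ l.filter (· ≠ '*') := by
  induction fuel with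
  | zero =>
    intro l acc h
    have hl : l = [] := List.length_eq_zero_iff.mp (by omega)
    subst hl
    show acc.reverse ++ ([] : List Char) = _
    simp
  | succ n ih =>
    intro l acc h
    cases l with
    | nil =>
      show acc.reverse = _
      simp
    | cons c t =>
      show (if ['*'].isPrefixOf (c :: t) then
          PySem.Chars.replace.go ['*'] [] n (List.drop ['*'].length (c :: t)) (([] : List Char).reverse ++ acc)
        else PySem.Chars.replace.go ['*'] [] n t (c :: acc)) = _
      simp only [List.length_cons] at h
      by_cases hc : c = '*'
      · subst hc
        rw [if_pos (by simp [List.isPrefixOf])]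
        rw [show List.drop ['*'].length ('*' :: t) = t from rfl, ih _ _ (by omega)]
        simp [List.filter]
      · rw [if_neg (by simp [List.isPrefixOf]; exact fun h' => hc h'.symm)]
        rw [ih _ _ (by omega)]
        simp [List.filter, hc]

theorem replace_star_filter (l : List Char) :
    PySem.Chars.replace l ['*'] [] = l.filter (· ≠ '*') := by
  show (if (['*'] : List Char).isEmpty then _ else PySem.Chars.replace.go ['*'] [] l.length l []) = _
  rw [if_neg (by simp), replace_go_star l.length l [] le_rfl]
  rfl

theorem pvPred_ne_star {c : Char} (h : pvPred c = true) : c ≠ '*' := by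
  intro hc; subst hc; exact absurd h (by decide)

theorem pvPred_ne_zero {c : Char} (h : pvPred c = true) : c ≠ '0' := by
  intro hc; subst hc; exact absurd h (by decide)

-- the two wraparound-free length-2 evaluations (stars allowed there: D_ needs length ≥ 3)
theorem swap2_star0 (b : Char) :
    (PySem.List.pyRange ((0 : Nat) : Int) ((2 : Nat) : Int) 1).foldl aSwapStep ['*', b] = ['*', b] := by
  rw [show PySem.List.pyRange ((0 : Nat) : Int) ((2 : Nat) : Int) 1 = [0, 1] from by decide]
  show aSwapStep (aSwapStep ['*', b] 0) 1 = ['*', b]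
  have h1 : aSwapStep ['*', b] 0 = [b, '*'] := by
    unfold aSwapStep
    norm_num [PySem.List.pyGet?, PySem.List.pySetD, PySem.List.pySet?, PySem.List.pyIdx?]
  rw [h1]
  unfold aSwapStep
  norm_num [PySem.List.pyGet?, PySem.List.pySetD, PySem.List.pySet?, PySem.List.pyIdx?]

theorem swap2_star1 (a : Char) (ha : a ≠ '*') :
    (PySem.List.pyRange ((0 : Nat) : Int) ((2 : Nat) : Int) 1).foldl aSwapStep [a, '*'] = ['*', a] := by
  rw [show PySem.List.pyRange ((0 : Nat) : Int) ((2 : Nat) : Int) 1 = [0, 1] from by decide]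
  show aSwapStep (aSwapStep [a, '*'] 0) 1 = ['*', a]
  have h0 : aSwapStep [a, '*'] 0 = [a, '*'] := by
    unfold aSwapStep
    rw [if_neg (by simp [PySem.List.pyGet?, PySem.List.pyIdx?, ha])]
  rw [h0]
  unfold aSwapStep
  norm_num [PySem.List.pyGet?, PySem.List.pySetD, PySem.List.pySet?, PySem.List.pyIdx?]

-- a counting form of "List.set is pointwise": used to see A's (wrapped) swaps as permutations
theorem count_set_aux (l : List Char) : ∀ (n : Nat) (v c x : Char), l[n]? = some c →
    (l.set n v).count x + (if c = x then 1 else 0) = l.count x + (if v = x then 1 else 0) := by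
  induction l with
  | nil => intro n v c x h; simp at h
  | cons hd tl ih =>
    intro n v c x h
    cases n with
    | zero =>
      simp only [List.getElem?_cons_zero, Option.some.injEq] at h
      subst h
      simp only [List.set_cons_zero, List.count_cons, beq_iff_eq]
      split_ifs <;> simp_all
    | succ n =>
      simp only [List.getElem?_cons_succ] at h
      simp only [List.set_cons_succ, List.count_cons, beq_iff_eq]
      have := ih n v c x h
      omega

-- every swap step of A (wrapped or not) permutes the characters
theorem swapStep_count (s : List Char) (j : Int) (x : Char) :
    (aSwapStep s j).count x = s.count x := by
  unfold aSwapStep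
  by_cases hif : PySem.List.pyGet? s j = some '*'
  · rw [if_pos hif]
    rcases h2 : PySem.List.pyGet? s (j - 2) with - | a
    · rcases h1 : PySem.List.pyGet? s (j - 1) with - | b <;> rfl
    · rcases h1 : PySem.List.pyGet? s (j - 1) with - | b
      · rfl
      · unfold PySem.List.pyGet? at h1 h2
        rcases hk2 : PySem.List.pyIdx? s.length (j - 2) with - | k2
        · rw [hk2] at h2; simp at h2
        rcases hk1 : PySem.List.pyIdx? s.length (j - 1) with - | k1
        · rw [hk1] at h1; simp at h1
        rw [hk2] at h2; rw [hk1] at h1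
        simp only [Option.bind_some] at h1 h2
        have hk1len : k1 < s.length := (List.getElem?_eq_some_iff.mp h1).1
        have hk2len : k2 < s.length := (List.getElem?_eq_some_iff.mp h2).1
        have e1 : PySem.List.pySetD s (j - 1) a = s.set k1 a := by
          unfold PySem.List.pySetD PySem.List.pySet?
          rw [hk1]
          rfl
        have e2 : PySem.List.pySetD (s.set k1 a) (j - 2) b = (s.set k1 a).set k2 b := by
          unfold PySem.List.pySetD PySem.List.pySet?
          rw [List.length_set, hk2]
          rfl
        show (PySem.List.pySetD (PySem.List.pySetD s (j - 1) a) (j - 2) b).count x = s.count x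
        rw [e1, e2]
        have hv2 : (s.set k1 a)[k2]? = some a := by
          by_cases hkk : k2 = k1
          · subst hkk
            simp [hk2len]
          · rw [List.getElem?_set_ne (by omega)]
            exact h2
        have c1 := count_set_aux s k1 a b x h1
        have c2 := count_set_aux (s.set k1 a) k2 b a x hv2
        split_ifs at c1 c2 <;> omega
  · rw [if_neg hif]

theorem foldl_swap_count (js : List Int) (s : List Char) (x : Char) :
    (js.foldl aSwapStep s).count x = s.count x := by
  induction js generalizing s with
  | nil => rfl
  | cons j js ih => rw [List.foldl_cons, ih, swapStep_count]

-- B's window fold also only permutes the characters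
theorem bScan_count (r : List Char) : ∀ (acc : List Char) (x y c : Char),
    ((r.foldl bStep (acc, x, y)).1 ++ [(r.foldl bStep (acc, x, y)).2.1, (r.foldl bStep (acc, x, y)).2.2]).count c
      = (acc ++ x :: y :: r).count c := by
  induction r with
  | nil => intro acc x y c; rfl
  | cons d r ih =>
    intro acc x y c
    by_cases hd : d = '*'
    · subst hd
      rw [List.foldl_cons, show bStep (acc, x, y) '*' = (acc ++ [y], x, '*') from rfl, ih]
      simp only [List.count_append, List.count_cons, List.count_nil, beq_iff_eq]
      split_ifs <;> omega
    · rw [List.foldl_cons, show bStep (acc, x, y) d = (acc ++ [x], y, d) from by simp [bStep, hd], ih]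
      simp only [List.count_append, List.count_cons, List.count_nil, beq_iff_eq]
      split_ifs <;> omega

-- two lists that are permutations of each other and consist of one repeated character are equal
theorem perm_allEq (v w : List Char) (hp : v.Perm w) (hall : ∀ a ∈ v, ∀ b ∈ v, a = b) : v = w := by
  cases hv : v with
  | nil => subst hv; exact hp.nil_eq
  | cons c vs =>
    subst hv
    have h1 : c :: vs = List.replicate (c :: vs).length c :=
      List.eq_replicate_iff.mpr ⟨rfl, fun b hb => hall b hb c (by simp)⟩
    have h2 : w = List.replicate (c :: vs).length c :=
      List.eq_replicate_iff.mpr ⟨hp.length_eq.symm, fun b hb => hall b (hp.mem_iff.mpr hb) c (by simp)⟩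
    rw [h1, ← h2]

-- ===== VERDICT =====
theorem decryptPassword_spec : Claim_unchanged_decryptPassword := by
  intro s _ hpre hnd
  obtain ⟨hcount, hsne⟩ := hpre
  unfold D_decryptPassword at hnd
  show decryptPassword s = decryptPassword_alt s
  have hlne : s.toList ≠ ['*'] := by
    intro h
    exact hsne (String.toList_inj.mp (by rw [h]; rfl))
  simp only [decryptPassword, decryptPassword_alt]
  rw [aPrefixLen_eq, bPrefixLen_eq]
  generalize hls : s.toList = l at *
  have hlpt : l = l.takeWhile pvPred ++ l.dropWhile pvPred :=
    (List.takeWhile_append_dropWhile (p := pvPred) (l := l)).symm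
  have hppred : ∀ c ∈ l.takeWhile pvPred, pvPred c := fun c hc => List.mem_takeWhile_imp hc
  generalize hp : l.takeWhile pvPred = p at *
  generalize ht : l.dropWhile pvPred = t at *
  have htake : l.take p.length = p := by rw [hlpt, List.take_left]
  have hdrop : l.drop p.length = t := by rw [hlpt, List.drop_left]
  rw [htake, hdrop, bFill_eq_zfill]
  rw [hdrop] at hcount
  have hp0 : ∀ c ∈ p, c ≠ '0' := fun c hc => pvPred_ne_zero (hppred c hc)
  have hps : ∀ c ∈ p, c ≠ '*' := fun c hc => pvPred_ne_star (hppred c hc)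
  have hafill : aFill l p.reverse p.length = some (p ++ zfill t p.reverse) := by
    rw [hlpt]
    exact aFill_eq p.reverse p t (fun d hd => hp0 d (List.mem_reverse.mp hd)) (by simpa using hcount)
  rw [hafill]
  show String.ofList (PySem.Chars.replace
      (List.drop p.length (List.foldl aSwapStep (p ++ zfill t p.reverse)
        (PySem.List.pyRange (p.length : Int) (l.length : Int) 1))) ['*'] []) = _
  rw [replace_star_filter]
  have hNu : (p ++ zfill t p.reverse).length = l.length := by
    rw [hlpt]; simp [length_zfill]
  have hplen : p.length ≤ l.length := by rw [hlpt]; simp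
  rcases he : (p ++ zfill t p.reverse) with - | ⟨c0, - | ⟨c1, rest⟩⟩
  · -- u = []
    rw [he] at hNu
    have hl0 : l = [] := by simpa using hNu.symm
    subst hl0
    have hpnil : p = [] := by
      rcases p with - | ⟨x, xs⟩
      · rfl
      · simp at hlpt
    subst hpnil
    simp only [List.length_nil]
    rw [pyRange_nat_nil 0 0 le_rfl]
    rfl
  · -- u = [c0]
    rw [he] at hNu
    simp only [List.length_cons, List.length_nil] at hNu
    have hl1 : l.length = 1 := by omega
    rcases Nat.le_one_iff_eq_zero_or_eq_one.mp (show p.length ≤ 1 by omega) with hi | hi <;> rw [hi, hl1]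
    · -- i = 0: the single character is not '*' (that would be s = "*", outside Pre_)
      have hc0 : c0 ≠ '*' := by
        intro hc; subst hc
        have h0 := u_star p t hps 0 (by rw [he]; rfl)
        rw [← hlpt] at h0
        rcases l with - | ⟨d0, lr⟩
        · simp at h0
        · simp only [List.getElem?_cons_zero, Option.some.injEq] at h0
          have hlr : lr = [] := by simpa using hl1
          exact hlne (by rw [h0, hlr])
      rw [show PySem.List.pyRange ((0 : Nat) : Int) ((1 : Nat) : Int) 1 = [0] from by decide]
      have hstep : aSwapStep [c0] 0 = [c0] := by
        unfold aSwapStep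
        rw [if_neg (by simp [PySem.List.pyGet?, PySem.List.pyIdx?, hc0])]
      simp only [List.foldl_cons, List.foldl_nil, hstep]
    · rw [pyRange_nat_nil 1 1 le_rfl]
      rfl
  · -- u = c0 :: c1 :: rest
    rw [he] at hNu
    simp only [List.length_cons] at hNu
    cases rest with
    | nil =>
      -- the string has length 2: D_ says nothing here, a '*' may sit at position 0 or 1,
      -- but A's wrapped swaps still produce B's output
      have hl2 : l.length = 2 := by simp only [List.length_nil] at hNu; omega
      have htlen : t.length = 2 - p.length := by
        have := congrArg List.length hlpt
        simp [hl2] at this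
        omega
      rcases p with - | ⟨a, - | ⟨a2, pr⟩⟩
      · -- i = 0 : u = t = l, stars possible at both positions
        simp only [List.length_nil, List.drop_zero]
        rw [hl2]
        by_cases h0 : c0 = '*'
        · subst h0
          rw [swap2_star0 c1]
          rfl
        · by_cases h1 : c1 = '*'
          · subst h1
            rw [swap2_star1 c0 h0]
            simp [List.filter, h0]
          · have hid : (PySem.List.pyRange ((0 : Nat) : Int) ((2 : Nat) : Int) 1).foldl aSwapStep [c0, c1]
                = [c0, c1] := by
              apply foldl_swap_id
              intro m h1m h2m
              have hm : m = 0 ∨ m = 1 := by omega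
              rcases hm with rfl | rfl
              · simp [h0]
              · simp [h1]
            rw [hid]
            rfl
      · -- i = 1 : the tail is a single '0', filled with the digit a
        have htb : ∃ b, t = [b] := by
          rcases t with - | ⟨b, - | _⟩ <;> simp at htlen ⊢
        obtain ⟨b, rfl⟩ := htb
        have hb0 : b = '0' := by
          by_contra hb
          simp [hb] at hcount
        subst hb0
        have hpa : pvPred a := hppred a (by simp)
        have hane : a ≠ '*' := pvPred_ne_star hpa
        have huaa : ([a] : List Char) ++ zfill ['0'] ([a] : List Char).reverse = [a, a] := by
          simp [zfill]
        rw [huaa] at he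
        obtain ⟨rfl, rfl⟩ : a = c0 ∧ a = c1 := by simpa using he
        simp only [List.length_cons, List.length_nil, Nat.zero_add]
        rw [hl2]
        have hid : (PySem.List.pyRange ((1 : Nat) : Int) ((2 : Nat) : Int) 1).foldl aSwapStep [a, a]
            = [a, a] := by
          apply foldl_swap_id
          intro m h1m h2m
          have hm : m = 1 := by omega
          subst hm
          simp [hane]
        rw [hid]
        rfl
      · -- i ≥ 2 : two leading digits but no '0' after them — excluded by Pre_
        exfalso
        have htnil : t = [] := by
          have h := congrArg List.length hlpt
          simp only [List.length_append, List.length_cons, hl2] at h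
          exact List.length_eq_zero_iff.mp (by omega)
        rw [htnil] at hcount
        simp at hcount
      | cons c2 r2 =>
      -- length ≥ 3: ¬D_ means either no '*' at positions 0/1 (no index ever wraps), or the
      -- non-'*' characters are all one character (the wrapped swaps permute, invisibly)
      simp only [List.length_cons] at hNu
      have hl3 : 3 ≤ l.length := by omega
      by_cases hst : '*' ∈ l.take 2
      case pos =>
        have hallEq : ∀ a ∈ l.filter (· ≠ '*'), ∀ b ∈ l.filter (· ≠ '*'), a = b := by
          intro a ha b hb
          by_contra hab
          exact hnd ⟨hl3, hst, a, ha, b, hb, hab⟩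
        have hpnil : p = [] := by
          rcases hpe : p with - | ⟨d, pr⟩
          · rfl
          · exfalso
            have hd : pvPred d := hppred d (by rw [hpe]; simp)
            have hdne : d ≠ '*' := pvPred_ne_star hd
            have hd0 : d ≠ '0' := pvPred_ne_zero hd
            have hdl : d ∈ l := by rw [hlpt, hpe]; simp
            rw [hlpt, hpe] at hst
            simp only [List.cons_append, List.take_succ_cons, List.mem_cons] at hst
            rcases hst with hst | hst
            · exact hdne hst.symm
            · rcases hpe2 : pr with - | ⟨d2, pr2⟩
              · subst hpe2
                rcases hte : t with - | ⟨t0, t1⟩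
                · subst hte; simp at hst
                · subst hte
                  simp only [List.nil_append, List.take_succ_cons, List.take_zero, List.mem_cons,
                    List.not_mem_nil, or_false] at hst
                  subst hst
                  rw [hpe] at hcount
                  have h0t : '0' ∈ '*' :: t1 := by
                    rw [← List.count_pos_iff]
                    simp only [List.length_cons, List.length_nil] at hcount
                    omega
                  have h0l : '0' ∈ l := by rw [hlpt]; simp [h0t]
                  exact hd0 (hallEq d (List.mem_filter.mpr ⟨hdl, by simp [hdne]⟩)
                    '0' (List.mem_filter.mpr ⟨h0l, by simp⟩))
              · subst hpe2
                have hd2 : pvPred d2 := hppred d2 (by rw [hpe]; simp)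
                simp only [List.cons_append, List.take_succ_cons, List.take_zero, List.mem_cons,
                  List.not_mem_nil, or_false] at hst
                subst hst
                exact pvPred_ne_star hd2 rfl
        subst hpnil
        have htl : t = c0 :: c1 :: c2 :: r2 := by simpa [zfill_nil_right] using he
        have hlu : l = c0 :: c1 :: c2 :: r2 := by rw [hlpt]; simpa using htl
        simp only [List.length_nil, List.drop_zero]
        have hA : (List.foldl aSwapStep (c0 :: c1 :: c2 :: r2)
            (PySem.List.pyRange ((0 : Nat) : Int) ((l.length : Nat) : Int) 1)).Perm
            (c0 :: c1 :: c2 :: r2) :=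
          List.perm_iff_count.mpr (fun x => foldl_swap_count _ _ x)
        have hB : ((List.foldl bStep (([] : List Char), c0, c1) (c2 :: r2)).1 ++
            [(List.foldl bStep (([] : List Char), c0, c1) (c2 :: r2)).2.1,
             (List.foldl bStep (([] : List Char), c0, c1) (c2 :: r2)).2.2]).Perm
            (c0 :: c1 :: c2 :: r2) :=
          List.perm_iff_count.mpr (fun x => by simpa using bScan_count (c2 :: r2) [] c0 c1 x)
        have hallu : ∀ a ∈ (c0 :: c1 :: c2 :: r2).filter (· ≠ '*'),
            ∀ b ∈ (c0 :: c1 :: c2 :: r2).filter (· ≠ '*'), a = b := by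
          rw [← hlu]; exact hallEq
        have hpA := hA.filter (· ≠ '*')
        have hpB := hB.filter (· ≠ '*')
        have h1 := perm_allEq _ _ hpA (fun a ha b hb => hallu a (hpA.mem_iff.mp ha) b (hpA.mem_iff.mp hb))
        have h2 := perm_allEq _ _ hpB (fun a ha b hb => hallu a (hpB.mem_iff.mp ha) b (hpB.mem_iff.mp hb))
        rw [h1, h2]
      case neg =>
      have hstar2 : '*' ∉ l.take 2 := hst
      have hc0 : c0 ≠ '*' := by
        intro hc; subst hc
        have h0 := u_star p t hps 0 (by rw [he]; rfl)
        rw [← hlpt] at h0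
        apply hstar2
        rcases l with - | ⟨d0, lr⟩
        · simp at h0
        · simp only [List.getElem?_cons_zero, Option.some.injEq] at h0
          simp [h0]
      have hc1 : c1 ≠ '*' := by
        intro hc; subst hc
        have h1 := u_star p t hps 1 (by rw [he]; rfl)
        rw [← hlpt] at h1
        apply hstar2
        rcases l with - | ⟨d0, - | ⟨d1, lr⟩⟩
        · simp at h1
        · simp at h1
        · simp only [List.getElem?_cons_succ, List.getElem?_cons_zero, Option.some.injEq] at h1
          simp [h1]
      have hstars01 : ∀ m : Nat, m < 2 → ¬ PySem.List.pyGet? (c0 :: c1 :: c2 :: r2) ((m : Nat) : Int) = some '*' := by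
        intro m hm hsome
        rw [PySem.List.pyGet?_natCast] at hsome
        rcases m with - | (- | m)
        · exact hc0 (by simpa using hsome)
        · exact hc1 (by simpa using hsome)
        · omega
      have hpmstar : ∀ m : Nat, 2 ≤ m → m < p.length →
          ¬ PySem.List.pyGet? (c0 :: c1 :: c2 :: r2) ((m : Nat) : Int) = some '*' := by
        intro m _ hm hsome
        rw [PySem.List.pyGet?_natCast, ← he, List.getElem?_append_left hm] at hsome
        exact hps '*' (List.mem_of_getElem? hsome) rfl
      have hEq2 : (PySem.List.pyRange ((p.length : Nat) : Int) ((l.length : Nat) : Int) 1).foldl aSwapStep (c0 :: c1 :: c2 :: r2)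
          = (PySem.List.pyRange ((2 : Nat) : Int) ((l.length : Nat) : Int) 1).foldl aSwapStep (c0 :: c1 :: c2 :: r2) := by
        by_cases hi : p.length ≤ 2
        · exact foldl_swap_skip _ l.length p.length 2 hi (by omega) (fun m _ h2 => hstars01 m h2)
        · exact (foldl_swap_skip _ l.length 2 p.length (by omega) hplen (fun m h1m h2m => hpmstar m h1m h2m)).symm
      rw [hEq2]
      have hs := scan_eq (c2 :: r2) [] c0 c1
      simp only [List.length_nil, Nat.zero_add, List.nil_append] at hs
      rw [show l.length = 2 + (c2 :: r2).length from by simp only [List.length_cons]; omega, hs]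

set_option maxRecDepth 8000 in
theorem decryptPassword_changed : Claim_changed_decryptPassword := by
  unfold Claim_changed_decryptPassword
  refine ⟨by decide, by decide, ⟨by decide, by decide, 'a', by decide, 'b', by decide, by decide⟩,
    by decide, by decide, by decide⟩
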